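-- pv_equiv track=rewrite | github.com/sharur7/reference_notebook | ref6.py | detect_strict_cycles
-- ===== SOURCE A (Python) =====
-- def detect_strict_cycles(Setpoints):
--     cycles = []
--     used_indices = set()  # Keep track of indices already included in a cycle
--
--     for start_index in range(len(Setpoints) - 1):
--         if start_index in used_indices:
--             continue  # Skip indices that have already been part of a cycle
--
--         for end_index in range(start_index + 1, len(Setpoints)):
--             # Ensure the end index hasn't been used and matches the start value
--             if end_index not in used_indices and Setpoints[start_index] == Setpoints[end_index]:
--                 # Add the indices of this cycle to the used set to avoid reuse
--                 used_indices.update(range(start_index, end_index + 1))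
--                 cycles.append((start_index, end_index))
--                 break  # Move to the next start_index after finding a cycle
--
--     return cycles
-- ===== SOURCE B (Python) =====
-- def detect_strict_cycles(Setpoints):
--     n = len(Setpoints)
--     # next occurrence of the same value, computed in one backward pass
--     nxt = [None] * n
--     last = {}
--     for i in range(n - 1, -1, -1):
--         v = Setpoints[i]
--         if v in last:
--             nxt[i] = last[v]
--         last[v] = i
--     cycles = []
--     i = 0
--     while i < n - 1:
--         j = nxt[i]
--         if j is None:
--             i += 1
--         else:
--             cycles.append((i, j))
--             i = j + 1
--     return cycles
-- ===== Notes on version B (the rewrite author's own statement) =====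
-- stated objective: faster
-- what changed: A's nested scan (for each start index, linearly search forward for the next equal value, tracking a used-index set) is replaced by one backward pass building a next-same-value index array via a dict plus a single forward scan that jumps past each found pair.
import Mathlib
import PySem

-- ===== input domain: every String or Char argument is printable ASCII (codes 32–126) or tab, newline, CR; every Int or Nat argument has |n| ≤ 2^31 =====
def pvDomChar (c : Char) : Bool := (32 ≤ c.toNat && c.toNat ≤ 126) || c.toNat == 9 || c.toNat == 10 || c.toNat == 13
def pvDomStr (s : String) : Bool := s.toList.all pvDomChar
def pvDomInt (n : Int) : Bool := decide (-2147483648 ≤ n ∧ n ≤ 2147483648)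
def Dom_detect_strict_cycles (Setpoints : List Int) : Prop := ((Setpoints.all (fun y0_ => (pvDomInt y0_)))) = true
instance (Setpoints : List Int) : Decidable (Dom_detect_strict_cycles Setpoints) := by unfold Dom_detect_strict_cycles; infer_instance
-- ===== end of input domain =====

-- B replaces A's nested scan by a precomputed next-same-value array (one backward pass with a
-- dict) plus a single forward scan that jumps past each found pair; objective: faster.

-- ===== PORT A =====
-- inner 'for end_index in range(start_index+1, len(Setpoints))' with break = first match
-- (both indices are always in range here, so comparing the pyGet? options is Python's == on the values)
def aFindEnd (xs : List Int) (used : PySem.Set Int) (s : Int) : Option Int :=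
  (PySem.List.pyRange (s + 1) (PySem.List.len xs) 1).find?
    (fun e => !(PySem.Set.contains used e) && (PySem.List.pyGet? xs s == PySem.List.pyGet? xs e))

-- outer 'for start_index in range(len(Setpoints) - 1)' with state (cycles, used_indices)
def aLoop (xs : List Int) (starts : List Int) (cycles : List (Int × Int))
    (used : PySem.Set Int) : List (Int × Int) :=
  match starts with
  | [] => cycles
  | s :: rest =>
    if PySem.Set.contains used s then aLoop xs rest cycles used
    else
      match aFindEnd xs used s with
      | some e =>
          aLoop xs rest (cycles ++ [(s, e)]) (PySem.Set.update used (PySem.List.pyRange s (e + 1) 1))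
      | none => aLoop xs rest cycles used

def detect_strict_cycles (Setpoints : List Int) : List (Int × Int) :=
  aLoop Setpoints (PySem.List.pyRange 0 (PySem.List.len Setpoints - 1) 1) [] PySem.Set.empty

-- ===== PORT B =====
-- backward pass of Source B: builds nxt (next index with the same value) and last (value -> least index seen)
-- (index i is always in range here, so pyGetD with default 0 reads exactly Setpoints[i])
def bNxtLoop (xs : List Int) (idxs : List Int) (nxt : List (Option Int))
    (last : PySem.Dict Int Int) : List (Option Int) × PySem.Dict Int Int :=
  match idxs with
  | [] => (nxt, last)
  | i :: rest =>
    let v := PySem.List.pyGetD xs i 0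
    let nxt' := if PySem.Dict.contains last v then nxt.set i.toNat (PySem.Dict.get? last v) else nxt
    bNxtLoop xs rest nxt' (PySem.Dict.insert last v i)

-- the 'while i < n - 1' loop of Source B; fuel n + 1 only makes the loop structurally total
-- (i strictly increases by at least 1 per iteration, so the fuel is never exhausted)
def bScan (nxt : List (Option Int)) (n : Int) : Nat → Int → List (Int × Int)
  | 0, _ => []
  | f + 1, i =>
    if i < n - 1 then
      match PySem.List.pyGetD nxt i none with
      | none => bScan nxt n f (i + 1)
      | some j => (i, j) :: bScan nxt n f (j + 1)
    else []

def detect_strict_cycles_alt (Setpoints : List Int) : List (Int × Int) :=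
  let n := PySem.List.len Setpoints
  let p := bNxtLoop Setpoints (PySem.List.pyRange (n - 1) (-1) (-1))
             (List.replicate Setpoints.length none) PySem.Dict.empty
  bScan p.1 n (Setpoints.length + 1) 0

-- ===== PRECONDITION & SPEC =====
def Spec_detect_strict_cycles (Setpoints : List Int) (out : List (Int × Int)) : Prop := out = detect_strict_cycles_alt Setpoints
instance (Setpoints : List Int) (out : List (Int × Int)) : Decidable (Spec_detect_strict_cycles Setpoints out) := by unfold Spec_detect_strict_cycles; infer_instance

-- ===== CLAIM (what is proved, stated in full; the proofs are below) =====
def Claim_equal_detect_strict_cycles : Prop := ∀ (Setpoints : List Int), Dom_detect_strict_cycles Setpoints → Spec_detect_strict_cycles Setpoints (detect_strict_cycles Setpoints)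

-- ===== LEMMAS AND PROOFS =====

theorem find?_congr_mem {α : Type} (l : List α) (p q : α → Bool)
    (h : ∀ x ∈ l, p x = q x) : l.find? p = l.find? q := by
  induction l with
  | nil => rfl
  | cons a t ih =>
    simp only [List.find?_cons]
    rw [h a (by simp)]
    cases q a
    · exact ih (fun x hx => h x (by simp [hx]))
    · rfl

theorem beq_comm' {α : Type} [BEq α] [LawfulBEq α] (a b : α) : (a == b) = (b == a) := by
  by_cases h : a = b <;> simp_all [eq_comm]

-- the first later index carrying the same value: the quantity both programs compute
def findI (xs : List Int) (s : Int) : Option Int :=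
  (PySem.List.pyRange (s + 1) (PySem.List.len xs) 1).find?
    (fun e => PySem.List.pyGet? xs s == PySem.List.pyGet? xs e)

theorem aFindEnd_eq_findI (xs : List Int) (used : PySem.Set Int) (s : Int)
    (h : ∀ u ∈ used, u ≤ s) : aFindEnd xs used s = findI xs s := by
  unfold aFindEnd findI
  apply find?_congr_mem
  intro e he
  rw [PySem.List.mem_pyRange_one] at he
  have hne : e ∉ used := fun hm => absurd (h e hm) (by omega)
  have hc : PySem.Set.contains used e = false := by
    rw [← Bool.not_eq_true, PySem.Set.contains_iff]; exact hne
  simp only [hc, Bool.not_false, Bool.true_and]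

theorem findI_bounds (xs : List Int) (s e : Int) (h : findI xs s = some e) :
    s < e ∧ e < PySem.List.len xs := by
  unfold findI at h
  have hm := List.mem_of_find?_eq_some h
  rw [PySem.List.mem_pyRange_one] at hm
  omega

-- A's outer loop skips a block of consecutive used indices
theorem aLoop_skip (xs : List Int) (used : PySem.Set Int) (C : List (Int × Int)) (m : Int)
    (d : Nat) (k : Int) (h : ∀ j : Int, k ≤ j → j < k + (d : Int) → j ∈ used) :
    aLoop xs (PySem.List.pyRange k m 1) C used
      = aLoop xs (PySem.List.pyRange (k + (d : Int)) m 1) C used := by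
  induction d generalizing k with
  | zero => simp
  | succ d ih =>
    by_cases hkm : k < m
    · rw [PySem.List.pyRange_one_cons hkm]
      have hc : PySem.Set.contains used k = true :=
        (PySem.Set.contains_iff used k).2 (h k le_rfl (by push_cast; omega))
      simp only [aLoop, hc, if_true]
      rw [ih (k + 1) (fun j h1 h2 => h j (by omega) (by push_cast at h2 ⊢; omega))]
      have harg : k + 1 + (d : Int) = k + ((d + 1 : Nat) : Int) := by push_cast; omega
      rw [harg]
    · rw [PySem.List.pyRange_one_eq_nil (by omega),
        PySem.List.pyRange_one_eq_nil (by push_cast; omega)]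

-- main correspondence between A's outer loop and B's jump scan
theorem aLoop_eq_bScan (xs : List Int) (nxt : List (Option Int))
    (hn : ∀ k : Int, 0 ≤ k → k < PySem.List.len xs - 1 →
      PySem.List.pyGetD nxt k none = findI xs k)
    (f : Nat) (k : Int) (hk : 0 ≤ k) (hf : (PySem.List.len xs - k).toNat ≤ f)
    (used : PySem.Set Int) (hu : ∀ u ∈ used, u < k) (C : List (Int × Int)) :
    aLoop xs (PySem.List.pyRange k (PySem.List.len xs - 1) 1) C used
      = C ++ bScan nxt (PySem.List.len xs) f k := by
  induction f generalizing k used C with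
  | zero =>
    rw [PySem.List.len_eq] at hf
    rw [PySem.List.pyRange_one_eq_nil (by rw [PySem.List.len_eq]; omega)]
    simp [aLoop, bScan]
  | succ f ih =>
    rw [PySem.List.len_eq] at hf
    by_cases hlt : k < PySem.List.len xs - 1
    · have hlt' : k < (xs.length : Int) - 1 := by rw [PySem.List.len_eq] at hlt; exact hlt
      rw [PySem.List.pyRange_one_cons hlt]
      have hcf : PySem.Set.contains used k = false := by
        rw [← Bool.not_eq_true, PySem.Set.contains_iff]
        intro hm; exact absurd (hu k hm) (lt_irrefl k)
      simp only [aLoop, hcf, Bool.false_eq_true, if_false]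
      rw [aFindEnd_eq_findI xs used k (fun u hm => le_of_lt (hu u hm))]
      rw [bScan]
      rw [if_pos hlt, hn k hk hlt]
      cases hfi : findI xs k with
      | none =>
        dsimp only
        exact ih (k + 1) (by omega) (by rw [PySem.List.len_eq]; omega) used
          (fun u hm => by have := hu u hm; omega) C
      | some e =>
        dsimp only
        obtain ⟨hke, hel⟩ := findI_bounds xs k e hfi
        rw [PySem.List.len_eq] at hel
        rw [aLoop_skip xs (PySem.Set.update used (PySem.List.pyRange k (e + 1) 1))
              (C ++ [(k, e)]) (PySem.List.len xs - 1) (e - k).toNat (k + 1)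
              (fun j h1 h2 => by
                refine (PySem.Set.mem_update used _ j).2 (Or.inr ?_)
                rw [PySem.List.mem_pyRange_one]
                omega)]
        have harg : k + 1 + ((e - k).toNat : Int) = e + 1 := by omega
        rw [harg]
        rw [ih (e + 1) (by omega) (by rw [PySem.List.len_eq]; omega)
          (PySem.Set.update used (PySem.List.pyRange k (e + 1) 1))
          (fun u hm => by
            rcases (PySem.Set.mem_update used _ u).1 hm with h' | h'
            · have := hu u h'; omega
            · rw [PySem.List.mem_pyRange_one] at h'; omega)
          (C ++ [(k, e)])]
        simp
    · rw [PySem.List.pyRange_one_eq_nil (by omega)]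
      rw [bScan, if_neg hlt]
      simp [aLoop]

-- invariant of B's backward pass: after processing indices xs.length-1 … k, the entries
-- nxt[j] for j ≥ k hold the next-same-value index and last maps each value to its least index ≥ k
theorem bNxtLoop_spec (xs : List Int) (k : Nat) (hk : k ≤ xs.length)
    (nxt : List (Option Int)) (last : PySem.Dict Int Int)
    (hlen : nxt.length = xs.length)
    (hset : ∀ j : Nat, k ≤ j → j < xs.length → nxt[j]? = some (findI xs (j : Int)))
    (hnone : ∀ j : Nat, j < k → nxt[j]? = some none)
    (hlast : ∀ v : Int, PySem.Dict.get? last v =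
      (PySem.List.pyRange (k : Int) (PySem.List.len xs) 1).find?
        (fun e => PySem.List.pyGet? xs e == some v)) :
    ∀ j : Nat, j < xs.length →
      (bNxtLoop xs (PySem.List.pyRange ((k : Int) - 1) (-1) (-1)) nxt last).1[j]? =
        some (findI xs (j : Int)) := by
  induction k generalizing nxt last with
  | zero =>
    rw [PySem.List.pyRange_neg_one_eq_nil (by norm_num)]
    exact fun j hj => hset j (Nat.zero_le j) hj
  | succ k ih =>
    have hkl : k < xs.length := hk
    have hco : ((k + 1 : Nat) : Int) - 1 = (k : Int) := by push_cast; ring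
    rw [hco, PySem.List.pyRange_neg_one_cons (by omega)]
    simp only [bNxtLoop]
    have hpg : PySem.List.pyGet? xs (k : Int) = some xs[k] := by
      rw [PySem.List.pyGet?_natCast]; exact List.getElem?_eq_getElem hkl
    have hv : PySem.List.pyGetD xs (k : Int) 0 = xs[k] := by
      rw [PySem.List.pyGetD_natCast]; exact List.getD_eq_getElem xs 0 hkl
    rw [hv]
    -- the current value's pending next index is exactly findI at k
    have hfind : findI xs (k : Int) = PySem.Dict.get? last xs[k] := by
      unfold findI
      rw [hlast xs[k]]
      have : ((k + 1 : Nat) : Int) = (k : Int) + 1 := by push_cast; ring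
      rw [this]
      apply find?_congr_mem
      intro e _
      rw [hpg]
      exact beq_comm' _ _
    have htoNat : ((k : Int)).toNat = k := Int.toNat_natCast k
    set nxt' := if PySem.Dict.contains last xs[k]
        then nxt.set ((k : Int)).toNat (PySem.Dict.get? last xs[k]) else nxt with hnxt'
    have hlen' : nxt'.length = xs.length := by
      rw [hnxt']; split <;> simp [hlen]
    have hk' : nxt'[k]? = some (findI xs (k : Int)) := by
      rw [hnxt', htoNat]
      cases hc : PySem.Dict.contains last xs[k] with
      | true =>
        rw [if_pos rfl, List.getElem?_set_self (by omega), hfind]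
      | false =>
        rw [if_neg (by simp)]
        have : PySem.Dict.get? last xs[k] = none := by
          rw [PySem.Dict.contains_eq_isSome_get?] at hc
          exact Option.not_isSome_iff_eq_none.1 (by simp [hc])
        rw [hnone k (Nat.lt_succ_self k), hfind, this]
    have hother : ∀ j : Nat, j ≠ k → nxt'[j]? = nxt[j]? := by
      intro j hj
      rw [hnxt', htoNat]
      split
      · exact List.getElem?_set_ne (fun h => hj h.symm)
      · rfl
    refine ih (by omega) nxt' (PySem.Dict.insert last xs[k] (k : Int)) hlen' ?_ ?_ ?_
    · intro j h1 h2
      rcases Nat.eq_or_lt_of_le h1 with h' | h'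
      · rw [← h']; exact hk'
      · rw [hother j (by omega)]; exact hset j (by omega) h2
    · intro j hj
      rw [hother j (by omega)]; exact hnone j (by omega)
    · intro v
      rw [PySem.List.pyRange_one_cons (by rw [PySem.List.len_eq]; omega), List.find?_cons]
      rw [hpg]
      by_cases hvv : v = xs[k]
      · subst hvv
        have ht : ((some xs[k] == some xs[k]) : Bool) = true := by simp
        rw [ht]
        exact PySem.Dict.get?_insert_self last xs[k] (k : Int)
      · have hff : ((some xs[k] == some v) : Bool) = false := by
          simp [Ne.symm hvv]
        have hcast2 : ((k + 1 : Nat) : Int) = (k : Int) + 1 := by push_cast; ring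
        rw [hff, PySem.Dict.get?_insert_of_ne last (k : Int) hvv, hlast v, hcast2]

-- ===== VERDICT (by name: the statement is the Claim_ definition above) =====
theorem detect_strict_cycles_spec : Claim_equal_detect_strict_cycles := by
  unfold Claim_equal_detect_strict_cycles Spec_detect_strict_cycles
  intro xs _
  unfold detect_strict_cycles detect_strict_cycles_alt
  have hnxt := bNxtLoop_spec xs xs.length le_rfl (List.replicate xs.length none)
    PySem.Dict.empty (by simp)
    (fun j h1 h2 => absurd h1 (by omega))
    (fun j hj => by simp [hj])
    (fun v => by
      rw [PySem.List.pyRange_one_eq_nil (by rw [PySem.List.len_eq])]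
      rfl)
  rw [PySem.List.len_eq]
  refine aLoop_eq_bScan xs _ ?_ (xs.length + 1) 0 le_rfl (by rw [PySem.List.len_eq]; omega) PySem.Set.empty
    (fun u hm => absurd hm (by simp [PySem.Set.empty])) []
  intro k h0 hk1
  have hk1' : k < (xs.length : Int) - 1 := by rw [PySem.List.len_eq] at hk1; exact hk1
  have hkn : k.toNat < xs.length := by omega
  have hcast : ((k.toNat : Nat) : Int) = k := Int.toNat_of_nonneg h0
  have := hnxt k.toNat hkn
  rw [← hcast, PySem.List.pyGetD_natCast, List.getD_eq_getElem?_getD, this]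
  rfl
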